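-- pv_equiv track=rewrite | github.com/junah201/Codeforces | Codeforces Round #834 (Div. 3)/D.py | count_two
-- ===== SOURCE A (Python) =====
-- def count_two(num: int):
--     result = 0
--     while num:
--         if num % 2 == 0:
--             result += 1
--         else:
--             break
--         num = num // 2
--
--     return result
-- ===== SOURCE B (Python) =====
-- def count_two(num: int):
--     # Closed form: the lowest set bit of num is num & -num; its bit position
--     # is the number of trailing factors of 2.
--     if num == 0:
--         return 0
--     return (num & -num).bit_length() - 1
-- ===== Notes on version B (the rewrite author's own statement) =====
-- stated objective: simpler
-- what changed: Replaced the per-factor halving while-loop with the closed-form bit trick isolating the lowest set bit (num & -num) and taking its bit_length; no loop remains.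
import Mathlib
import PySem

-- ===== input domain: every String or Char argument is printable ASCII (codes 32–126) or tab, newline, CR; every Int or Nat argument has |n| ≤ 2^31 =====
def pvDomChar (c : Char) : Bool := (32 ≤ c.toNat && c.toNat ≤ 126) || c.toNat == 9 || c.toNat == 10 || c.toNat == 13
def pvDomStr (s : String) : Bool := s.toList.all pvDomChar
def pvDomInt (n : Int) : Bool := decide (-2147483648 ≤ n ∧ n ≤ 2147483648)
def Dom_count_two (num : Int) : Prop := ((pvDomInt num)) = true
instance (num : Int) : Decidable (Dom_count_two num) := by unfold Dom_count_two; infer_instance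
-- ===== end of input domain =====

-- B replaces the halving while-loop with the closed-form bit trick (num & -num).bit_length() - 1.

-- ===== PORT A =====
-- the 'while num:' loop of A, with its accumulator `result`
def count_two_go (num result : Int) : Int :=
  if _h0 : num = 0 then result
  else if _he : PySem.Int.mod num 2 = 0 then
    count_two_go (PySem.Int.floordiv num 2) (result + 1)
  else result
termination_by num.natAbs
decreasing_by
  obtain ⟨m, hm⟩ := (PySem.Int.mod_eq_zero_iff_dvd num 2).mp _he
  have hfd : PySem.Int.floordiv num 2 = m := by
    have h2 := PySem.Int.floordiv_mul_add_mod num 2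
    rw [_he] at h2; omega
  rw [hfd]; omega

def count_two (num : Int) : Int := count_two_go num 0

-- ===== PORT B =====
-- (num & -num).bit_length() - 1; num & -num is positive here, so PySem.Int.bitLength is exact
def count_two_alt (num : Int) : Int :=
  if num = 0 then 0
  else (PySem.Int.bitLength (PySem.Int.band num (-num)) : Int) - 1

-- ===== PRECONDITION & SPEC =====
def Spec_count_two (num : Int) (out : Int) : Prop := out = count_two_alt num
instance (num : Int) (out : Int) : Decidable (Spec_count_two num out) := by unfold Spec_count_two; infer_instance

-- ===== CLAIM (what is proved, stated in full; the proofs are below) =====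
def Claim_equal_count_two : Prop := ∀ (num : Int), Dom_count_two num → Spec_count_two num (count_two num)

-- ===== LEMMAS AND PROOFS =====

-- `n - (n &&& (n-1))` is the lowest set bit of n (what Python's num & -num computes, on |num|)
def lowbit (n : Nat) : Nat := n - (n &&& (n-1))

theorem land_pred_odd (b : Nat) : (2*b+1) &&& (2*b) = 2*b := by
  apply Nat.eq_of_testBit_eq; intro i
  cases i with
  | zero => simp [Nat.testBit_zero]
  | succ i =>
    rw [Nat.testBit_land, Nat.testBit_succ, Nat.testBit_succ]
    have h1 : (2*b+1)/2 = b := by omega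
    have h2 : 2*b/2 = b := by omega
    rw [h1, h2]; simp

theorem land_pred_even (b : Nat) (hb : 0 < b) : (2*b) &&& (2*b-1) = 2*(b &&& (b-1)) := by
  apply Nat.eq_of_testBit_eq; intro i
  cases i with
  | zero => simp [Nat.testBit_zero]
  | succ i =>
    rw [Nat.testBit_land, Nat.testBit_succ, Nat.testBit_succ, Nat.testBit_succ]
    have h1 : 2*b/2 = b := by omega
    have h2 : (2*b-1)/2 = b-1 := by omega
    have h3 : 2*(b &&& (b-1))/2 = b &&& (b-1) := by omega
    rw [h1, h2, h3, Nat.testBit_land]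

theorem lowbit_odd (n : Nat) (h : n % 2 = 1) : lowbit n = 1 := by
  obtain ⟨b, rfl⟩ : ∃ b, n = 2*b+1 := ⟨n/2, by omega⟩
  unfold lowbit
  have : 2*b+1-1 = 2*b := by omega
  rw [this, land_pred_odd]; omega

theorem lowbit_even (n : Nat) (h0 : 0 < n) (h : n % 2 = 0) : lowbit n = 2 * lowbit (n/2) := by
  obtain ⟨b, rfl⟩ : ∃ b, n = 2*b := ⟨n/2, by omega⟩
  have hb : 0 < b := by omega
  unfold lowbit
  rw [land_pred_even b hb]
  have hland : b &&& (b-1) ≤ b := Nat.and_le_left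
  have h2 : 2*b/2 = b := by omega
  rw [h2]; omega

theorem lowbit_pos (n : Nat) (h0 : 0 < n) : 0 < lowbit n := by
  induction n using Nat.strong_induction_on with
  | _ n ih =>
    rcases Nat.even_or_odd n with he | ho
    · have h : n % 2 = 0 := Nat.even_iff.mp he
      rw [lowbit_even n h0 h]
      have := ih (n/2) (by omega) (by omega)
      omega
    · rw [lowbit_odd n (Nat.odd_iff.mp ho)]; omega

-- Python's num & -num equals the lowest set bit of |num|
theorem band_neg_self (num : Int) (h : num ≠ 0) :
    PySem.Int.band num (-num) = ((lowbit num.natAbs : Nat) : Int) := by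
  unfold PySem.Int.band lowbit
  rcases lt_or_gt_of_ne h with hneg | hpos
  · have h1 : ¬ (0 ≤ num) := by omega
    have h2 : (0:Int) ≤ -num := by omega
    simp only [h1, h2, if_true, if_false]
    have e1 : (-num).toNat = num.natAbs := by omega
    have e2 : (-num - 1).toNat = num.natAbs - 1 := by omega
    rw [e1, e2]
  · have h1 : (0:Int) ≤ num := by omega
    have h2 : ¬ ((0:Int) ≤ -num) := by omega
    simp only [h1, h2, if_true, if_false]
    have e1 : num.toNat = num.natAbs := by omega
    have e2 : (-(-num) - 1).toNat = num.natAbs - 1 := by omega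
    rw [e1, e2]

theorem bitLength_two_mul (x : Nat) (hx : 0 < x) :
    PySem.Int.bitLength ((2*x : Nat) : Int) = PySem.Int.bitLength ((x : Nat) : Int) + 1 := by
  have h := PySem.Int.bitLength_natCast (m := 2*x) (by omega)
  have h2 : 2*x/2 = x := by omega
  rw [h2] at h
  exact h

theorem go_eq (n : Nat) : ∀ (num result : Int), num.natAbs = n → num ≠ 0 →
    count_two_go num result
      = result + ((PySem.Int.bitLength (PySem.Int.band num (-num)) : Int) - 1) := by
  induction n using Nat.strong_induction_on with
  | _ n ih =>
    intro num result hn h0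
    rw [count_two_go, band_neg_self num h0]
    simp only [h0, dite_false]
    by_cases he : PySem.Int.mod num 2 = 0
    · simp only [he]
      obtain ⟨m, hm⟩ := (PySem.Int.mod_eq_zero_iff_dvd num 2).mp he
      have hfd : PySem.Int.floordiv num 2 = m := by
        have h2 := PySem.Int.floordiv_mul_add_mod num 2
        rw [he] at h2; omega
      have hm0 : m ≠ 0 := by omega
      have hlt : m.natAbs < n := by omega
      rw [hfd, ih m.natAbs hlt m (result + 1) rfl hm0, band_neg_self m hm0]
      have habs : num.natAbs = 2 * m.natAbs := by omega
      have hdiv : num.natAbs / 2 = m.natAbs := by omega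
      rw [hn] at habs hdiv ⊢
      rw [lowbit_even n (by omega) (by omega), hdiv,
          bitLength_two_mul _ (lowbit_pos m.natAbs (by omega))]
      push_cast; ring
    · simp only [he]
      have hodd : num.natAbs % 2 = 1 := by
        rcases PySem.Int.mod_two_eq num with h | h
        · exact absurd h he
        · have h2 := PySem.Int.floordiv_mul_add_mod num 2
          rw [h] at h2; omega
      rw [lowbit_odd _ hodd]
      norm_num
      have : PySem.Int.bitLength ((1:Nat) : Int) = 1 := by decide
      simp at this
      rw [this]; ring

-- ===== VERDICT (by name: the statement is the Claim_ definition above) =====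
theorem count_two_spec : Claim_equal_count_two := by
  intro num _
  unfold Spec_count_two count_two count_two_alt
  by_cases h : num = 0
  · subst h
    rw [count_two_go]
    simp
  · rw [go_eq num.natAbs num 0 rfl h]
    simp [h]
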